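-- pv_equiv track=rewrite | github.com/rodinany/ColingPython-p1 | HW2/B/B.py | solution
-- ===== SOURCE A (Python) =====
-- def solution(x):
--     l = len(x)
--     if 'h' in x:
--         h_amount = x.count('h')
--         n = 0
--         for i in range(l):
--             if x[i] == 'h':
--                 n += 1
--                 if n > 1 and n < h_amount:
--                     x = x[:i] + 'H' + x[i+1:]
--                     l = len(x)
--                 else:
--                     continue
--     m = ''
--     for i in range(len(x)):
--         if i == 0 or i % 3 != 0:
--             m = m + x[i]
--     x = m
--     l = len(x)
--     while True:
--         if '1' in x:
--             for i in range(l):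
--                 if x[i] == '1':
--                     x = x[:i] + 'one' + x[i+1:]
--                     l = len(x)
--         else:
--             break
--     return x
-- ===== SOURCE B (Python) =====
-- def solution(x):
--     # one pass over the original string, backed by a precomputed set of the
--     # "middle" h positions (all h indices except the first and last one)
--     hs = [i for i, c in enumerate(x) if c == 'h']
--     middle = set(hs[1:-1]) if len(hs) >= 3 else set()
--     out = []
--     for i, c in enumerate(x):
--         if i > 0 and i % 3 == 0:
--             continue
--         if i in middle:
--             out.append('H')
--         elif c == '1':
--             out.append('one')
--         else:
--             out.append(c)
--     return ''.join(out)
-- ===== Notes on version B (the rewrite author's own statement) =====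
-- stated objective: simpler
-- what changed: A rebuilds the string three times (slice-splicing 'h'->'H' marks in place, then a drop-every-3rd rebuild, then a repeated-rescan while-loop expanding '1'->'one'); B precomputes the h-index list once, takes its middle as a set, and emits the whole result in a single enumerate pass.
import Mathlib
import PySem

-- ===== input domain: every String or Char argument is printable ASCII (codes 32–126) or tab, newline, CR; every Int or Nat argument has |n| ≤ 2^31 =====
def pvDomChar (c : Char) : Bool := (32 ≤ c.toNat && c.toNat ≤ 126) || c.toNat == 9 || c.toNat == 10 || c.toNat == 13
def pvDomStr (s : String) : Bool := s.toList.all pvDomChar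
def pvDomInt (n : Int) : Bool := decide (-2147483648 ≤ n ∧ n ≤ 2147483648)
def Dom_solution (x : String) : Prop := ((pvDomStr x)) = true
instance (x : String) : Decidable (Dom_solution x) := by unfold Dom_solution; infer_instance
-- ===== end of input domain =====

-- B replaces A's three sequential rebuild-the-string passes by one traversal of the
-- original string backed by a precomputed set of the "middle" h positions (objective:
-- simpler single pass; no speed claim).

-- ===== PORT A =====
-- pass 1 of A: mark middle 'h's; loop state = (x, n) (the Python's `l = len(x)`
-- update inside this loop is dead: the replacement keeps the length and l is
-- recomputed before its next use); x[i] is always in range here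
def pass1 (xs : List Char) : List Char :=
  if PySem.Chars.isIn ['h'] xs then
    let hAmount : Int := PySem.Chars.count xs ['h']
    ((PySem.List.pyRange 0 (xs.length : Int)).foldl (fun (st : List Char × Int) i =>
      if PySem.List.pyGet? st.1 i = some 'h' then
        let n := st.2 + 1
        if 1 < n ∧ n < hAmount then
          (PySem.List.slice st.1 none (some i) ++ ['H'] ++
           PySem.List.slice st.1 (some (i + 1)) none, n)
        else (st.1, n)
      else st) (xs, 0)).1
  else xs

-- pass 2 of A: keep index 0 and indices not divisible by 3 (x[i] always in range)
def pass2 (cs : List Char) : List Char :=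
  (PySem.List.pyRange 0 (cs.length : Int)).foldl (fun m i =>
    if i = 0 ∨ PySem.Int.mod i 3 ≠ 0 then m ++ (PySem.List.pyGet? cs i).toList
    else m) []

-- pass-3 inner `for i in range(l)` loop; state = (x, l) (`l = len(x)` is live here:
-- the next `while` round's `range(l)` reads it)
def solInner (x : List Char) (l : Int) : List Char × Int :=
  (PySem.List.pyRange 0 l).foldl (fun st i =>
    if PySem.List.pyGet? st.1 i = some '1' then
      let x' := PySem.List.slice st.1 none (some i) ++ ['o', 'n', 'e'] ++
                PySem.List.slice st.1 (some (i + 1)) none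
      (x', (x'.length : Int))
    else st) (x, l)

-- pass-3 `while True:` loop; the fuel argument only guards termination (the number
-- of '1's strictly drops each round, so the fuel passed below is never exhausted)
def solWhile : Nat → List Char → Int → List Char
  | 0, x, _ => x
  | f + 1, x, l =>
    if PySem.Chars.isIn ['1'] x then
      let st := solInner x l
      solWhile f st.1 st.2
    else x

def solution (x : String) : String :=
  let xs := x.toList
  let xs1 := pass1 xs
  let m := pass2 xs1
  String.ofList (solWhile (m.count '1' + 1) m (m.length : Int))

-- ===== PORT B =====
def solution_alt (x : String) : String :=
  let xs := x.toList
  let hs : List Int := ((PySem.List.enumerate xs).filter (fun p => p.2 == 'h')).map (·.1)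
  let middle : PySem.Set Int :=
    if 3 ≤ hs.length then PySem.Set.ofList (PySem.List.slice hs (some 1) (some (-1)))
    else PySem.Set.empty
  let out : List Char :=
    (PySem.List.enumerate xs).foldl (fun out p =>
      if 0 < p.1 ∧ PySem.Int.mod p.1 3 = 0 then out
      else if PySem.Set.contains middle p.1 then out ++ ['H']
      else if p.2 = '1' then out ++ ['o', 'n', 'e']
      else out ++ [p.2]) []
  String.ofList out

-- ===== PRECONDITION & SPEC =====
def Spec_solution (x : String) (out : String) : Prop := out = solution_alt x
instance (x : String) (out : String) : Decidable (Spec_solution x out) := by unfold Spec_solution; infer_instance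

-- ===== CLAIM (what is proved, stated in full; the proofs are below) =====
def Claim_equal_solution : Prop := ∀ (x : String), Dom_solution x → Spec_solution x (solution x)

-- ===== LEMMAS AND PROOFS =====

-- "middle h" condition at index k: there is an 'h' strictly before and strictly after
def hcond (xs : List Char) (k : Nat) : Bool := ('h' ∈ xs.take k) && ('h' ∈ xs.drop (k + 1))

-- closed form of pass 1
def markF (xs : List Char) : List Char :=
  xs.mapIdx (fun k c => if c = 'h' ∧ hcond xs k then 'H' else c)

def markUpTo (xs : List Char) (n : Nat) : List Char :=
  xs.mapIdx (fun k c => if k < n ∧ c = 'h' ∧ hcond xs k then 'H' else c)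

-- closed form of pass 3: every '1' expanded to "one"
def repl1 (cs : List Char) : List Char :=
  cs.flatMap (fun c => if c = '1' then ['o', 'n', 'e'] else [c])

-- common normal form of both programs
def emit (xs : List Char) (k : Nat) : List Char :=
  if k ≠ 0 ∧ k % 3 = 0 then []
  else if xs.getD k ' ' = 'h' ∧ hcond xs k then ['H']
  else if xs.getD k ' ' = '1' then ['o', 'n', 'e']
  else [xs.getD k ' ']

def normF (xs : List Char) : List Char := (List.range xs.length).flatMap (emit xs)

-- ---- small bridges ----

theorem singleton_infix_iff_mem (c : Char) (xs : List Char) : [c] <:+: xs ↔ c ∈ xs := by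
  constructor
  · rintro ⟨s, t, rfl⟩; simp
  · intro h
    obtain ⟨s, t, rfl⟩ := List.append_of_mem h
    exact ⟨s, t, by simp⟩

theorem isIn_singleton (c : Char) (xs : List Char) :
    PySem.Chars.isIn [c] xs = true ↔ c ∈ xs := by
  rw [PySem.Chars.isIn_iff_infix, singleton_infix_iff_mem]

theorem count_go_singleton (c : Char) :
    ∀ (fuel : Nat) (l : List Char) (acc : Nat), l.length ≤ fuel →
      PySem.Chars.count.go [c] fuel l acc = acc + l.count c := by
  intro fuel
  induction fuel with
  | zero => intro l acc h; rw [PySem.Chars.count.go]; cases l <;> simp_all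
  | succ f ih =>
    intro l acc h
    cases l with
    | nil => rw [PySem.Chars.count.go]; simp; omega
    | cons a t =>
      rw [PySem.Chars.count.go]
      by_cases hc : a = c
      · subst hc
        simp only [List.isPrefixOf]
        simp [ih t _ (by simpa using h)]
        omega
      · simp [List.isPrefixOf, hc, Ne.symm hc, ih t _ (by simpa using h)]

theorem count_singleton (c : Char) (xs : List Char) :
    PySem.Chars.count xs [c] = xs.count c := by
  rw [PySem.Chars.count]
  simp [count_go_singleton c xs.length xs 0 le_rfl]

theorem repl1_append (a b : List Char) : repl1 (a ++ b) = repl1 a ++ repl1 b := by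
  simp [repl1]

theorem one_not_mem_repl1 (u : List Char) : '1' ∉ repl1 u := by
  simp only [repl1, List.mem_flatMap]
  rintro ⟨c, _, hm⟩
  by_cases h : c = '1'
  · simp [h] at hm
  · simp [h] at hm
    exact h hm.symm

theorem repl1_of_not_mem (u : List Char) (h : '1' ∉ u) : repl1 u = u := by
  induction u with
  | nil => rfl
  | cons a t ih => simp_all [repl1]; simp [Ne.symm h.1]

theorem length_le_repl1_length (u : List Char) : u.length ≤ (repl1 u).length := by
  induction u with
  | nil => simp [repl1]
  | cons a t ih => by_cases h : a = '1' <;> simp [repl1, h] at * <;> omega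

theorem slice_one_neg_one {α : Type} (l : List α) :
    PySem.List.slice l (some 1) (some (-1)) = l.dropLast.tail := by
  simp [PySem.List.slice, PySem.List.clampIdx]
  rcases l with _ | ⟨a, t⟩
  · simp
  · simp [List.dropLast_eq_take, List.take_cons]
    rcases t with _ | ⟨b, t'⟩ <;> simp

-- ---- pass 1 ----

theorem markUpTo_length (xs : List Char) (n : Nat) : (markUpTo xs n).length = xs.length := by
  simp [markUpTo]

theorem markUpTo_getElem (xs : List Char) (n k : Nat) (hk : k < xs.length) :
    (markUpTo xs n)[k]'(by simp [markUpTo_length, hk]) =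
      if k < n ∧ xs[k] = 'h' ∧ hcond xs k then 'H' else xs[k] := by
  simp [markUpTo]

theorem markUpTo_succ_of_not (xs : List Char) (n : Nat)
    (h : ∀ hn : n < xs.length, ¬(xs[n] = 'h' ∧ hcond xs n)) :
    markUpTo xs (n + 1) = markUpTo xs n := by
  apply List.ext_getElem (by simp [markUpTo_length])
  intro k h1 h2
  have hk : k < xs.length := by simpa [markUpTo_length] using h1
  rw [markUpTo_getElem xs (n+1) k hk, markUpTo_getElem xs n k hk]
  by_cases hkn : k < n
  · simp [hkn, Nat.lt_succ_of_lt hkn]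
  · by_cases hke : k = n
    · subst hke; simp [h hk, hkn]
    · have : ¬ k < n + 1 := by omega
      simp [this, hkn]

theorem markUpTo_succ_of (xs : List Char) (n : Nat) (hn : n < xs.length)
    (h : xs[n] = 'h' ∧ hcond xs n) :
    markUpTo xs (n + 1) =
      (markUpTo xs n).take n ++ ['H'] ++ (markUpTo xs n).drop (n + 1) := by
  have hs : markUpTo xs (n + 1) = (markUpTo xs n).set n 'H' := by
    apply List.ext_getElem (by simp [markUpTo_length])
    intro k h1 h2
    have hk : k < xs.length := by simpa [markUpTo_length] using h1
    rw [markUpTo_getElem xs (n+1) k hk, List.getElem_set]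
    by_cases hke : n = k
    · subst hke; simp [h, hn]
    · rw [markUpTo_getElem xs n k hk]
      by_cases hkn : k < n
      · simp [hke, hkn, Nat.lt_succ_of_lt hkn]
      · have : ¬ k < n + 1 := by omega
        simp [hke, hkn, this]
  rw [hs, List.set_eq_take_cons_drop 'H' (by simp [markUpTo_length, hn])]
  simp

theorem hcond_iff_counts (xs : List Char) (n : Nat) (hn : n < xs.length) (hh : xs[n] = 'h') :
    (1 < ((xs.take n).count 'h' : Int) + 1 ∧
     ((xs.take n).count 'h' : Int) + 1 < (xs.count 'h' : Int)) ↔ hcond xs n := by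
  have hsplit : xs.count 'h' = (xs.take n).count 'h' + 1 + (xs.drop (n+1)).count 'h' := by
    conv_lhs => rw [← List.take_append_drop n xs]
    rw [List.count_append, List.drop_eq_getElem_cons hn, List.count_cons]
    simp [hh]
    omega
  have h1 : 'h' ∈ xs.take n ↔ 0 < (xs.take n).count 'h' := by
    rw [List.count_pos_iff]
  have h2 : 'h' ∈ xs.drop (n+1) ↔ 0 < (xs.drop (n+1)).count 'h' := by
    rw [List.count_pos_iff]
  simp only [hcond, Bool.and_eq_true, decide_eq_true_eq]
  constructor
  · rintro ⟨a, b⟩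
    rw [hsplit] at b
    exact ⟨h1.mpr (by omega), h2.mpr (by push_cast at b; omega)⟩
  · rintro ⟨a, b⟩
    rw [h1] at a; rw [h2] at b
    refine ⟨by omega, ?_⟩
    rw [hsplit]; push_cast; omega

theorem pass1_inv (xs : List Char) (n : Nat) (hn : n ≤ xs.length) :
    (PySem.List.pyRange 0 (n : Int)).foldl (fun (st : List Char × Int) i =>
        if PySem.List.pyGet? st.1 i = some 'h' then
          let m := st.2 + 1
          if 1 < m ∧ m < (xs.count 'h' : Int) then
            (PySem.List.slice st.1 none (some i) ++ ['H'] ++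
             PySem.List.slice st.1 (some (i + 1)) none, m)
          else (st.1, m)
        else st) (xs, 0)
      = (markUpTo xs n, ((xs.take n).count 'h' : Int)) := by
  induction n with
  | zero =>
    have h0 : markUpTo xs 0 = xs := by
      apply List.ext_getElem (by simp [markUpTo_length])
      intro k h1 h2
      rw [markUpTo_getElem xs 0 k h2]
      simp
    simp [PySem.List.pyRange, h0]
  | succ n ih =>
    have hn' : n < xs.length := hn
    have hr : ((n : Int) + 1) = (((n + 1 : Nat)) : Int) := by push_cast; ring
    rw [← hr, PySem.List.pyRange_one_succ_right (by positivity), List.foldl_append,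
      ih (le_of_lt hn')]
    simp only [List.foldl_cons, List.foldl_nil]
    have hget : PySem.List.pyGet? (markUpTo xs n) (n : Int) =
        some ((markUpTo xs n)[n]'(by simp [markUpTo_length, hn'])) := by
      rw [PySem.List.pyGet?_natCast]
      exact List.getElem?_eq_getElem _
    rw [hget, markUpTo_getElem xs n n hn']
    simp only [lt_irrefl, false_and, if_false]
    by_cases hh : xs[n] = 'h'
    · simp only [hh, if_pos rfl]
      have hcnt : ((xs.take (n+1)).count 'h' : Int) = ((xs.take n).count 'h' : Int) + 1 := by
        rw [List.take_add_one, List.getElem?_eq_getElem hn', Option.toList_some,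
          List.count_append]
        simp [hh]
      by_cases hc : xs[n] = 'h' ∧ hcond xs n
      · rw [if_pos ((hcond_iff_counts xs n hn' hh).mpr hc.2)]
        rw [PySem.List.slice_to_natCast]
        have : ((n : Int) + 1) = ((n + 1 : Nat) : Int) := by push_cast; ring
        rw [this, PySem.List.slice_from_natCast]
        rw [markUpTo_succ_of xs n hn' hc, hcnt]
        simp
      · have hnc : ¬ hcond xs n := fun h => hc ⟨hh, h⟩
        rw [if_neg (fun h => hnc ((hcond_iff_counts xs n hn' hh).mp h))]
        rw [markUpTo_succ_of_not xs n (fun _ h => hc h), hcnt]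
        simp
    · rw [if_neg (by simp [hh])]
      rw [markUpTo_succ_of_not xs n (fun _ h => hh h.1)]
      have : ((xs.take (n+1)).count 'h' : Int) = ((xs.take n).count 'h' : Int) := by
        have h0 : List.count 'h' [xs[n]] = 0 :=
          List.count_eq_zero_of_not_mem (by simpa using fun h => hh h.symm)
        rw [List.take_add_one, List.getElem?_eq_getElem hn', Option.toList_some,
          List.count_append, h0]
        norm_num
      rw [this]

theorem markUpTo_full (xs : List Char) : markUpTo xs xs.length = markF xs := by
  apply List.ext_getElem (by simp [markUpTo_length, markF])
  intro k h1 h2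
  have hk : k < xs.length := by simpa [markUpTo_length] using h1
  rw [markUpTo_getElem xs xs.length k hk]
  simp [markF, hk]

theorem markF_id_of_no_h (xs : List Char) (h : 'h' ∉ xs) : markF xs = xs := by
  apply List.ext_getElem (by simp [markF])
  intro k h1 h2
  have hk : k < xs.length := h2
  have : xs[k] ≠ 'h' := fun he => h (he ▸ List.getElem_mem hk)
  simp [markF, this]

theorem pass1_eq (xs : List Char) : pass1 xs = markF xs := by
  rw [pass1]
  by_cases h : PySem.Chars.isIn ['h'] xs = true
  · rw [if_pos h]
    show (((PySem.List.pyRange 0 (xs.length : Int)).foldl _ (xs, 0)).1 = markF xs)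
    rw [show ((PySem.Chars.count xs ['h'] : Nat) : Int) = ((xs.count 'h' : Nat) : Int) from by
      rw [count_singleton]]
    rw [pass1_inv xs xs.length le_rfl]
    exact markUpTo_full xs
  · rw [if_neg h, markF_id_of_no_h]
    intro hm
    exact h ((isIn_singleton 'h' xs).mpr hm)

-- ---- pass 2 ----

theorem pass2_eq (cs : List Char) :
    pass2 cs = (List.range cs.length).flatMap (fun k =>
        if k ≠ 0 ∧ k % 3 = 0 then [] else [cs.getD k ' ']) := by
  rw [pass2]
  suffices h : ∀ n, n ≤ cs.length →
      (PySem.List.pyRange 0 (n : Int)).foldl (fun m i =>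
        if i = 0 ∨ PySem.Int.mod i 3 ≠ 0 then m ++ (PySem.List.pyGet? cs i).toList
        else m) []
      = (List.range n).flatMap (fun k =>
          if k ≠ 0 ∧ k % 3 = 0 then [] else [cs.getD k ' ']) from h cs.length le_rfl
  intro n
  induction n with
  | zero => intro _; simp [PySem.List.pyRange]
  | succ n ih =>
    intro hn
    have hn' : n < cs.length := hn
    have hr : ((n : Int) + 1) = (((n + 1 : Nat)) : Int) := by push_cast; ring
    rw [← hr, PySem.List.pyRange_one_succ_right (by positivity), List.foldl_append,
      ih (le_of_lt hn'), List.range_succ, List.flatMap_append]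
    simp only [List.foldl_cons, List.foldl_nil, List.flatMap_cons, List.flatMap_nil,
      List.append_nil]
    have hmod : PySem.Int.mod (n : Int) 3 = ((n % 3 : Nat) : Int) := by
      exact_mod_cast PySem.Int.mod_natCast n 3
    have hget : PySem.List.pyGet? cs (n : Int) = some (cs.getD n ' ') := by
      rw [PySem.List.pyGet?_natCast, List.getElem?_eq_getElem hn', List.getD_eq_getElem _ _ hn']
    by_cases hc : n ≠ 0 ∧ n % 3 = 0
    · rw [if_neg, if_pos hc, List.append_nil]
      push_neg
      refine ⟨by exact_mod_cast hc.1, ?_⟩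
      rw [hmod]; exact_mod_cast hc.2
    · rw [if_pos, if_neg hc, hget]
      simp
      by_cases h0 : n = 0
      · left; simp [h0]
      · right
        rw [hmod]
        intro h
        exact hc ⟨h0, by exact_mod_cast h⟩

-- ---- pass 3 ----

theorem inner_inv (z : List Char) (j : Nat) (hj : j ≤ z.length) :
    ∃ u v, z = u ++ v ∧
      ((PySem.List.pyRange 0 (j : Int)).foldl (fun st i =>
        if PySem.List.pyGet? st.1 i = some '1' then
          let x' := PySem.List.slice st.1 none (some i) ++ ['o', 'n', 'e'] ++
                    PySem.List.slice st.1 (some (i + 1)) none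
          (x', (x'.length : Int))
        else st) (z, (z.length : Int)))
      = (repl1 u ++ v, ((repl1 u ++ v).length : Int)) ∧ j ≤ (repl1 u).length := by
  induction j with
  | zero =>
    refine ⟨[], z, by simp, ?_, by simp⟩
    simp [PySem.List.pyRange, repl1]
  | succ j ih =>
    obtain ⟨u, v, hz, hst, hle⟩ := ih (by omega)
    have hr : ((j : Int) + 1) = (((j + 1 : Nat)) : Int) := by push_cast; ring
    rw [← hr, PySem.List.pyRange_one_succ_right (by positivity), List.foldl_append, hst]
    simp only [List.foldl_cons, List.foldl_nil]
    rcases Nat.lt_or_ge j (repl1 u).length with hlt | hge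
    · -- scanning inside repl1 u: the char there is never '1'
      refine ⟨u, v, hz, ?_, by omega⟩
      have hgetj : PySem.List.pyGet? (repl1 u ++ v) (j : Int) = some ((repl1 u)[j]) := by
        rw [PySem.List.pyGet?_natCast, List.getElem?_append_left hlt,
          List.getElem?_eq_getElem hlt]
      rw [hgetj, if_neg]
      intro hcontra
      have : (repl1 u)[j] ∈ repl1 u := List.getElem_mem hlt
      have h1 : (repl1 u)[j] = '1' := by injection hcontra
      exact one_not_mem_repl1 u (h1 ▸ this)
    · -- j = (repl1 u).length: the scan reads the head of v
      have hje : j = (repl1 u).length := le_antisymm (by omega) hge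
      have hvne : v ≠ [] := by
        intro hv
        have := length_le_repl1_length u
        have hzl : z.length = u.length + v.length := by rw [hz]; simp
        rw [hv] at hzl
        simp at hzl
        omega
      rcases v with _ | ⟨c, v'⟩
      · exact absurd rfl hvne
      have hgetj : PySem.List.pyGet? (repl1 u ++ c :: v') (j : Int) = some c := by
        rw [hje]
        exact_mod_cast PySem.List.pyGet?_append_length (repl1 u) v' c
      by_cases hc : c = '1'
      · subst hc
        rw [hgetj, if_pos rfl]
        refine ⟨u ++ ['1'], v', by simp [hz], ?_, ?_⟩
        · have htake : PySem.List.slice (repl1 u ++ '1' :: v') none (some (j : Int)) = repl1 u := by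
            rw [PySem.List.slice_to_natCast, hje]
            exact List.take_left' rfl
          have hdrop : PySem.List.slice (repl1 u ++ '1' :: v') (some ((j : Int) + 1)) = v' := by
            rw [hr, PySem.List.slice_from_natCast]
            have hsplit2 : repl1 u ++ '1' :: v' = (repl1 u ++ ['1']) ++ v' := by simp
            rw [hsplit2, hje]
            have hlen : (repl1 u ++ ['1']).length = (repl1 u).length + 1 := by simp
            rw [← hlen]
            exact List.drop_left
          rw [htake, hdrop]
          have : repl1 (u ++ ['1']) = repl1 u ++ ['o', 'n', 'e'] := by
            rw [repl1_append]; rfl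
          rw [this]
        · have : (repl1 (u ++ ['1'])).length = (repl1 u).length + 3 := by
            rw [repl1_append]; simp [repl1]
          omega
      · rw [hgetj, if_neg (by simpa using hc)]
        refine ⟨u ++ [c], v', by simp [hz], ?_, ?_⟩
        · have h1 : repl1 (u ++ [c]) = repl1 u ++ [c] := by
            rw [repl1_append]; simp [repl1, hc]
          rw [h1]
          simp
        · have h1 : (repl1 (u ++ [c])).length = (repl1 u).length + 1 := by
            rw [repl1_append]; simp [repl1, hc]
          omega

theorem inner_spec (z : List Char) :
    ∃ u v, z = u ++ v ∧ (solInner z (z.length : Int)).1 = repl1 u ++ v ∧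
      (solInner z (z.length : Int)).2 = ((repl1 u ++ v).length : Int) ∧
      ('1' ∈ z → v.count '1' < z.count '1') := by
  obtain ⟨u, v, hz, hst, hle⟩ := inner_inv z z.length le_rfl
  refine ⟨u, v, hz, by rw [solInner, hst], by rw [solInner, hst], ?_⟩
  intro hone
  have hcnt : z.count '1' = u.count '1' + v.count '1' := by rw [hz, List.count_append]
  have hu : 0 < u.count '1' := by
    by_contra hu0
    have hu0 : u.count '1' = 0 := by omega
    have hnm : '1' ∉ u := fun hm => by
      have := List.count_pos_iff.mpr hm; omega
    have hru : repl1 u = u := repl1_of_not_mem u hnm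
    have hzl : z.length = u.length + v.length := by rw [hz]; simp
    rw [hru] at hle
    have hv : v = [] := List.eq_nil_of_length_eq_zero (by omega : v.length = 0)
    rw [hz, hv] at hone
    simp at hone
    exact hnm hone
  omega

theorem while_spec : ∀ (f : Nat) (z : List Char) (l : Int),
    z.count '1' < f → l = (z.length : Int) → solWhile f z l = repl1 z := by
  intro f
  induction f with
  | zero => intro z l h _; omega
  | succ f ih =>
    intro z l h hl
    rw [solWhile]
    by_cases hone : '1' ∈ z
    · rw [if_pos ((isIn_singleton '1' z).mpr hone)]
      subst hl
      obtain ⟨u, v, hz, h1, h2, hdec⟩ := inner_spec z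
      have hdec := hdec hone
      have hcnt : (repl1 u ++ v).count '1' = v.count '1' := by
        rw [List.count_append, List.count_eq_zero_of_not_mem (one_not_mem_repl1 u)]
        omega
      show solWhile f (solInner z ↑z.length).1 (solInner z ↑z.length).2 = repl1 z
      rw [h1, h2, ih (repl1 u ++ v) _ (by omega) rfl]
      rw [repl1_append, repl1_of_not_mem (repl1 u) (one_not_mem_repl1 u), hz, repl1_append]
    · rw [if_neg (by simp [isIn_singleton '1' z, hone])]
      exact (repl1_of_not_mem z hone).symm

-- ---- normal form, A side ----

theorem markF_getD (xs : List Char) (k : Nat) (hk : k < xs.length) :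
    (markF xs).getD k ' ' = if xs[k] = 'h' ∧ hcond xs k then 'H' else xs[k] := by
  have hlen : k < (markF xs).length := by simpa [markF] using hk
  rw [List.getD_eq_getElem _ _ hlen]
  simp [markF]

theorem a_norm (xs : List Char) :
    repl1 ((List.range (markF xs).length).flatMap (fun k =>
      if k ≠ 0 ∧ k % 3 = 0 then [] else [(markF xs).getD k ' '])) = normF xs := by
  have hlen : (markF xs).length = xs.length := by simp [markF]
  rw [hlen, repl1, List.flatMap_assoc, normF]
  apply List.flatMap_congr
  intro k hk
  rw [List.mem_range] at hk
  rw [markF_getD xs k hk, emit]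
  rw [List.getD_eq_getElem _ _ hk]
  by_cases hskip : k ≠ 0 ∧ k % 3 = 0
  · simp [hskip]
  · rw [if_neg hskip, if_neg hskip]
    by_cases hm : xs[k] = 'h' ∧ hcond xs k
    · simp [hm]
    · simp only [if_neg hm]
      by_cases h1 : xs[k] = '1'
      · simp [h1]
      · simp [h1]

theorem solution_eq_norm (x : String) :
    solution x = String.ofList (normF x.toList) := by
  show String.ofList (solWhile ((pass2 (pass1 x.toList)).count '1' + 1)
    (pass2 (pass1 x.toList)) ((pass2 (pass1 x.toList)).length : Int)) = _
  rw [while_spec _ _ _ (by omega) rfl]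
  rw [pass1_eq, pass2_eq]
  exact congrArg String.ofList (a_norm x.toList)

-- ---- normal form, B side ----

theorem hs_eq (xs : List Char) :
    ((PySem.List.enumerate xs).filter (fun p => p.2 == 'h')).map (·.1)
      = ((List.range xs.length).filter (fun k => xs.getD k ' ' == 'h')).map (fun k : Nat => Int.ofNat k) := by
  rw [PySem.List.enumerate_eq_map_pyRange xs ' ',
    show PySem.List.len xs = ((xs.length : Nat) : Int) from rfl,
    PySem.List.pyRange_zero_natCast, List.map_map, List.filter_map, List.map_map]
  have hfil : List.filter ((fun p : Int × Char => p.2 == 'h') ∘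
      ((fun j => (j, PySem.List.pyGetD xs j ' ')) ∘ (fun k : Nat => (k : Int)))) (List.range xs.length)
      = List.filter (fun k => xs.getD k ' ' == 'h') (List.range xs.length) := by
    apply List.filter_congr
    intro k _
    simp [PySem.List.pyGetD_natCast]
  rw [hfil]
  rfl

theorem filter_range_ne_nil_take (xs : List Char) (k : Nat) (hk : k ≤ xs.length) :
    ((List.range k).filter (fun j => xs.getD j ' ' == 'h') ≠ []) ↔ 'h' ∈ xs.take k := by
  rw [Ne, List.filter_eq_nil_iff]
  push_neg
  constructor
  · rintro ⟨j, hj, hp⟩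
    rw [List.mem_range] at hj
    have hjl : j < xs.length := lt_of_lt_of_le hj hk
    have hp' : xs.getD j ' ' = 'h' := by simpa using hp
    rw [List.getD_eq_getElem _ _ hjl] at hp'
    rw [List.mem_iff_getElem]
    exact ⟨j, by simp [hjl, hj], by rw [List.getElem_take]; exact hp'⟩
  · intro hm
    rw [List.mem_iff_getElem] at hm
    obtain ⟨j, hj, he⟩ := hm
    have hjk : j < k := lt_of_lt_of_le hj (by simp)
    have hjl : j < xs.length := by
      have := List.length_take_le k xs
      simp at hj
      omega
    rw [List.getElem_take] at he
    refine ⟨j, List.mem_range.mpr hjk, ?_⟩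
    rw [List.getD_eq_getElem _ _ hjl]
    simp [he]

theorem filter_range_ne_nil_drop (xs : List Char) (k : Nat) :
    (((List.range (xs.length - (k + 1))).map (fun j => k + 1 + j)).filter
        (fun j => xs.getD j ' ' == 'h') ≠ []) ↔ 'h' ∈ xs.drop (k + 1) := by
  rw [Ne, List.filter_eq_nil_iff]
  push_neg
  constructor
  · rintro ⟨j, hj, hp⟩
    rw [List.mem_map] at hj
    obtain ⟨j', hj', rfl⟩ := hj
    rw [List.mem_range] at hj'
    have hjl : k + 1 + j' < xs.length := by omega
    have hp' : xs.getD (k + 1 + j') ' ' = 'h' := by simpa using hp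
    rw [List.getD_eq_getElem _ _ hjl] at hp'
    rw [List.mem_iff_getElem]
    refine ⟨j', by simp; omega, ?_⟩
    rw [List.getElem_drop]
    exact hp'
  · intro hm
    rw [List.mem_iff_getElem] at hm
    obtain ⟨j, hj, he⟩ := hm
    simp at hj
    rw [List.getElem_drop] at he
    refine ⟨k + 1 + j, List.mem_map.mpr ⟨j, List.mem_range.mpr (by omega), rfl⟩, ?_⟩
    rw [List.getD_eq_getElem _ _ (by omega)]
    simp [he]

theorem mem_dropLast_tail_mid (A B : List Int) (a : Int) (hA : a ∉ A) (hB : a ∉ B) :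
    a ∈ ((A ++ [a] ++ B).dropLast.tail) ↔ A ≠ [] ∧ B ≠ [] := by
  rcases B with _ | ⟨b, B'⟩
  · rw [List.append_nil, List.dropLast_concat]
    simp only [ne_eq, not_true_eq_false, and_false, iff_false]
    intro hmem
    exact hA (List.mem_of_mem_tail hmem)
  · rw [show A ++ [a] ++ b :: B' = (A ++ [a]) ++ b :: B' from by simp,
      List.dropLast_append_of_ne_nil (by simp)]
    rcases A with _ | ⟨c, A'⟩
    · simp only [List.nil_append, List.cons_append, List.tail_cons, ne_eq,
        not_true_eq_false, false_and, iff_false]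
      intro hmem
      exact hB (List.dropLast_subset _ hmem)
    · simp only [List.cons_append, List.append_assoc, List.tail_cons, ne_eq]
      constructor
      · intro _; exact ⟨by simp, by simp⟩
      · intro _
        simp

theorem middle_mem (xs : List Char) (k : Nat) (hk : k < xs.length) :
    (PySem.Set.contains
      (if 3 ≤ (((PySem.List.enumerate xs).filter (fun p => p.2 == 'h')).map (·.1)).length then
        PySem.Set.ofList (PySem.List.slice
          (((PySem.List.enumerate xs).filter (fun p => p.2 == 'h')).map (·.1)) (some 1) (some (-1)))
      else PySem.Set.empty) (k : Int) = true)
    ↔ (xs[k] = 'h' ∧ hcond xs k) := by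
  rw [hs_eq]
  have hsplit : (List.range xs.length).filter (fun j => xs.getD j ' ' == 'h')
      = ((List.range k).filter (fun j => xs.getD j ' ' == 'h')) ++ ([k].filter (fun j => xs.getD j ' ' == 'h'))
        ++ (((List.range (xs.length - (k+1))).map (fun j => k + 1 + j)).filter (fun j => xs.getD j ' ' == 'h')) := by
    conv_lhs => rw [show xs.length = (k+1) + (xs.length - (k+1)) from by omega]
    rw [List.range_add, List.filter_append, List.range_succ, List.filter_append]
  set p : Nat → Bool := fun j => xs.getD j ' ' == 'h' with hp
  set K1 := (List.range k).filter p with hK1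
  set K2 := ((List.range (xs.length - (k+1))).map (fun j => k + 1 + j)).filter p with hK2
  have hbound1 : ∀ a ∈ K1, a < k := by
    intro a ha
    rw [hK1, List.mem_filter, List.mem_range] at ha
    exact ha.1
  have hbound2 : ∀ a ∈ K2, k < a := by
    intro a ha
    rw [hK2, List.mem_filter, List.mem_map] at ha
    obtain ⟨⟨j, _, rfl⟩, _⟩ := ha
    omega
  by_cases hxk : xs[k] = 'h'
  · have hpk : [k].filter p = [k] := by
      rw [hp]; simp [List.getD, List.getElem?_eq_getElem hk, hxk]
    rw [hsplit, hpk]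
    have hnotin1 : (Int.ofNat k) ∉ K1.map (fun j : Nat => Int.ofNat j) := by
      rw [List.mem_map]
      rintro ⟨j, hj, hje⟩
      have := hbound1 j hj
      have := Int.ofNat_inj.mp hje
      omega
    have hnotin2 : (Int.ofNat k) ∉ K2.map (fun j : Nat => Int.ofNat j) := by
      rw [List.mem_map]
      rintro ⟨j, hj, hje⟩
      have := hbound2 j hj
      have := Int.ofNat_inj.mp hje
      omega
    have hrhs : (xs[k] = 'h' ∧ hcond xs k) ↔ (K1 ≠ [] ∧ K2 ≠ []) := by
      rw [hcond]
      constructor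
      · rintro ⟨-, hc⟩
        simp only [Bool.and_eq_true, decide_eq_true_eq] at hc
        exact ⟨(filter_range_ne_nil_take xs k (le_of_lt hk)).mpr hc.1,
          (filter_range_ne_nil_drop xs k).mpr hc.2⟩
      · rintro ⟨h1, h2⟩
        refine ⟨hxk, ?_⟩
        simp only [Bool.and_eq_true, decide_eq_true_eq]
        exact ⟨(filter_range_ne_nil_take xs k (le_of_lt hk)).mp h1,
          (filter_range_ne_nil_drop xs k).mp h2⟩
    rw [hrhs]
    have hmapsplit : (K1 ++ [k] ++ K2).map (fun j : Nat => Int.ofNat j)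
        = K1.map (fun j : Nat => Int.ofNat j) ++ [Int.ofNat k] ++ K2.map (fun j : Nat => Int.ofNat j) := by
      simp
    by_cases hg : 3 ≤ ((K1 ++ [k] ++ K2).map (fun j : Nat => Int.ofNat j)).length
    · rw [if_pos hg]
      have hiff : (PySem.Set.contains (PySem.Set.ofList (PySem.List.slice
          ((K1 ++ [k] ++ K2).map (fun j : Nat => Int.ofNat j)) (some 1) (some (-1)))) (k : Int) = true)
          ↔ (k : Int) ∈ PySem.List.slice ((K1 ++ [k] ++ K2).map (fun j : Nat => Int.ofNat j)) (some 1) (some (-1)) := by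
        simp [pysem]
      rw [hiff, slice_one_neg_one, hmapsplit,
        show ((k : Int)) = Int.ofNat k from rfl,
        mem_dropLast_tail_mid _ _ _ hnotin1 hnotin2]
      simp
    · rw [if_neg hg]
      simp only [PySem.Set.contains, PySem.Set.empty]
      constructor
      · intro h; simp at h
      · rintro ⟨h1, h2⟩
        exfalso
        apply hg
        simp only [List.length_map, List.length_append, List.length_cons, List.length_nil]
        have := List.length_pos_of_ne_nil h1
        have := List.length_pos_of_ne_nil h2
        omega
  · simp only [hxk, false_and, iff_false]
    intro hcontra
    have hmem : (k : Int) ∈ ((List.range xs.length).filter p).map (fun j : Nat => Int.ofNat j) := by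
      by_cases hg : 3 ≤ (((List.range xs.length).filter p).map (fun j : Nat => Int.ofNat j)).length
      · rw [if_pos hg] at hcontra
        have hm2 : (k : Int) ∈ PySem.List.slice (((List.range xs.length).filter p).map (fun j : Nat => Int.ofNat j)) (some 1) (some (-1)) := by
          revert hcontra
          simp [pysem]
        rw [slice_one_neg_one] at hm2
        exact List.dropLast_subset _ (List.mem_of_mem_tail hm2)
      · rw [if_neg hg] at hcontra
        simp [PySem.Set.contains, PySem.Set.empty] at hcontra
    rw [List.mem_map] at hmem
    obtain ⟨j, hj, hje⟩ := hmem
    have hjk : j = k := Int.ofNat_inj.mp hje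
    subst hjk
    rw [List.mem_filter] at hj
    have : xs.getD j ' ' = 'h' := by simpa [hp] using hj.2
    rw [List.getD_eq_getElem _ _ hk] at this
    exact hxk this

theorem b_norm (xs : List Char) :
    (PySem.List.enumerate xs).foldl (fun out p =>
      if 0 < p.1 ∧ PySem.Int.mod p.1 3 = 0 then out
      else if PySem.Set.contains
        (if 3 ≤ (((PySem.List.enumerate xs).filter (fun p => p.2 == 'h')).map (·.1)).length then
          PySem.Set.ofList (PySem.List.slice
            (((PySem.List.enumerate xs).filter (fun p => p.2 == 'h')).map (·.1)) (some 1) (some (-1)))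
        else PySem.Set.empty) p.1 then out ++ ['H']
      else if p.2 = '1' then out ++ ['o', 'n', 'e']
      else out ++ [p.2]) [] = normF xs := by
  set M := (if 3 ≤ (((PySem.List.enumerate xs).filter (fun p => p.2 == 'h')).map (·.1)).length then
          PySem.Set.ofList (PySem.List.slice
            (((PySem.List.enumerate xs).filter (fun p => p.2 == 'h')).map (·.1)) (some 1) (some (-1)))
        else PySem.Set.empty) with hM
  rw [PySem.List.foldl_congr_mem' _ _ (fun out (p : Int × Char) => out ++
      (if 0 < p.1 ∧ PySem.Int.mod p.1 3 = 0 then []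
       else if PySem.Set.contains M p.1 then ['H']
       else if p.2 = '1' then ['o', 'n', 'e']
       else [p.2])) []
    (by
      intro p _ acc
      show _ = acc ++ _
      by_cases h1 : 0 < p.1 ∧ PySem.Int.mod p.1 3 = 0
      · rw [if_pos h1, if_pos h1, List.append_nil]
      · rw [if_neg h1, if_neg h1]
        by_cases h2 : PySem.Set.contains M p.1 = true
        · rw [if_pos h2, if_pos h2]
        · rw [if_neg h2, if_neg h2]
          by_cases h3 : p.2 = '1'
          · rw [if_pos h3, if_pos h3]
          · rw [if_neg h3, if_neg h3])]
  rw [PySem.List.foldl_append_eq_flatMap]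
  rw [List.nil_append]
  rw [PySem.List.enumerate_eq_map_pyRange xs ' ',
    show PySem.List.len xs = ((xs.length : Nat) : Int) from rfl,
    PySem.List.pyRange_zero_natCast, List.map_map, List.flatMap_map]
  rw [normF]
  apply List.flatMap_congr
  intro k hk
  rw [List.mem_range] at hk
  simp only [Function.comp_apply, PySem.List.pyGetD_natCast]
  rw [emit]
  by_cases hskip : k ≠ 0 ∧ k % 3 = 0
  · rw [if_pos hskip, if_pos]
    constructor
    · exact_mod_cast Nat.pos_of_ne_zero hskip.1
    · have hmc : PySem.Int.mod (k : Int) 3 = ((k % 3 : Nat) : Int) := by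
        exact_mod_cast PySem.Int.mod_natCast k 3
      rw [hmc]
      exact_mod_cast hskip.2
  · rw [if_neg hskip, if_neg]
    swap
    · rintro ⟨h0, hm⟩
      apply hskip
      constructor
      · intro hk0; subst hk0; simp at h0
      · have hmc : PySem.Int.mod (k : Int) 3 = ((k % 3 : Nat) : Int) := by
          exact_mod_cast PySem.Int.mod_natCast k 3
        rw [hmc] at hm
        exact_mod_cast hm
    · have hmid := middle_mem xs k hk
      rw [← hM] at hmid
      rw [List.getD_eq_getElem _ _ hk]
      by_cases hmm : xs[k] = 'h' ∧ hcond xs k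
      · rw [if_pos (hmid.mpr hmm), if_pos hmm]
      · rw [if_neg (fun h => hmm (hmid.mp h)), if_neg hmm]

theorem solution_alt_eq_norm (x : String) :
    solution_alt x = String.ofList (normF x.toList) := by
  show String.ofList ((PySem.List.enumerate x.toList).foldl (fun out p =>
      if 0 < p.1 ∧ PySem.Int.mod p.1 3 = 0 then out
      else if PySem.Set.contains
        (if 3 ≤ (((PySem.List.enumerate x.toList).filter (fun p => p.2 == 'h')).map (·.1)).length then
          PySem.Set.ofList (PySem.List.slice
            (((PySem.List.enumerate x.toList).filter (fun p => p.2 == 'h')).map (·.1)) (some 1) (some (-1)))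
        else PySem.Set.empty) p.1 then out ++ ['H']
      else if p.2 = '1' then out ++ ['o', 'n', 'e']
      else out ++ [p.2]) []) = String.ofList (normF x.toList)
  exact congrArg String.ofList (b_norm x.toList)

-- ===== VERDICT (by name: the statement is the Claim_ definition above) =====
theorem solution_spec : Claim_equal_solution := by
  intro x _
  unfold Spec_solution
  rw [solution_eq_norm, solution_alt_eq_norm]
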